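-- pv_equiv track=rewrite | github.com/TurgayBU/end_to_end_chat_app | file_encryption.py | _text_to_matrix
-- ===== SOURCE A (Python) =====
-- def _text_to_matrix(text):
--     """Metni matrise çevir"""
--     matrix = [[0 for _ in range(4)] for _ in range(4)]
--     for i in range(4):
--         for j in range(4):
--             idx = i + 4 * j
--             if idx < len(text):
--                 matrix[i][j] = ord(text[idx])
--     return matrix
-- ===== SOURCE B (Python) =====
-- def _text_to_matrix(text):
--     """Metni matrise çevir"""
--     codes = [ord(c) for c in text[:16]]
--     codes += [0] * (16 - len(codes))
--     cols = [codes[k:k + 4] for k in range(0, 16, 4)]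
--     return [list(row) for row in zip(*cols)]
-- ===== Notes on version B (the rewrite author's own statement) =====
-- stated objective: alternative
-- what changed: Instead of writing into a preallocated 4x4 matrix cell by cell with a bounds check, B builds the padded code list of length 16, chunks it into four columns, and transposes the column list (zip) to get the rows; no index arithmetic or in-place writes.
import Mathlib
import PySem

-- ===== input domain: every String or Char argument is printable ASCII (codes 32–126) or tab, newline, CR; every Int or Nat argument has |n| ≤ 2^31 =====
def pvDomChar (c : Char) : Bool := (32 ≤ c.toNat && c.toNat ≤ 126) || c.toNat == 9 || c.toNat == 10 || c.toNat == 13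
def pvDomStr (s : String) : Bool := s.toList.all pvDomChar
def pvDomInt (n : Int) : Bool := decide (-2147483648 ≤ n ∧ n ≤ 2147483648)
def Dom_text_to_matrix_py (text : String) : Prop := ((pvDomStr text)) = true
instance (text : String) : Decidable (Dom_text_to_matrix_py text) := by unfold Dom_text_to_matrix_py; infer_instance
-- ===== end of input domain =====

-- B replaces A's cell-by-cell writes into a preallocated 4x4 matrix by padding the code
-- list to 16, chunking it into four columns and transposing; objective: alternative.

-- ===== PORT A =====
-- matrix[i][j] = v is ported as List.modify (in-place row update)
def text_to_matrix_py (text : String) : List (List Int) :=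
  let cs := text.toList
  let matrix : List (List Int) :=
    (List.range 4).map (fun _ => (List.range 4).map (fun _ => (0 : Int)))
  (PySem.List.pyRange 0 4 1).foldl (fun m i =>
    (PySem.List.pyRange 0 4 1).foldl (fun m j =>
      let idx := i + 4 * j
      if idx < (cs.length : Int) then
        m.modify i.toNat (fun row =>
          row.set j.toNat ((PySem.List.pyGetD cs idx (Char.ofNat 0)).toNat : Int))
      else m) m) matrix

-- ===== PORT B =====
-- zip(*cols): cols always has exactly four lists, so zip(*cols) is a 4-ary zip
def pvZip4 {α : Type} : List α → List α → List α → List α → List (List α)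
  | x :: xs, y :: ys, z :: zs, w :: ws => [x, y, z, w] :: pvZip4 xs ys zs ws
  | _, _, _, _ => []

def text_to_matrix_py_alt (text : String) : List (List Int) :=
  let codes : List Int :=
    (PySem.List.slice text.toList none (some 16)).map (fun c => (c.toNat : Int))
  let codes := codes ++ List.replicate (16 - codes.length) (0 : Int)
  let cols := (PySem.List.pyRange 0 16 4).map (fun k =>
    PySem.List.slice codes (some k) (some (k + 4)))
  match cols with
  | [a, b, c, d] => pvZip4 a b c d
  | _ => []

-- ===== PRECONDITION & SPEC =====
def Spec_text_to_matrix_py (text : String) (out : List (List Int)) : Prop := out = text_to_matrix_py_alt text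
instance (text : String) (out : List (List Int)) : Decidable (Spec_text_to_matrix_py text out) := by unfold Spec_text_to_matrix_py; infer_instance

-- ===== CLAIM (what is proved, stated in full; the proofs are below) =====
def Claim_equal_text_to_matrix_py : Prop := ∀ (text : String), Dom_text_to_matrix_py text → Spec_text_to_matrix_py text (text_to_matrix_py text)

-- ===== LEMMAS AND PROOFS =====
theorem pv_cond16 (n : Nat) (k : Int) (h : k < 16) : (k < (n : Int) + 16) = True :=
  eq_true (by omega)

-- ===== VERDICT (by name: the statement is the Claim_ definition above) =====
set_option maxHeartbeats 2000000 in
theorem text_to_matrix_py_spec : Claim_equal_text_to_matrix_py := by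
  intro text _
  show text_to_matrix_py text = text_to_matrix_py_alt text
  unfold text_to_matrix_py text_to_matrix_py_alt
  generalize text.toList = cs
  rcases cs with _ | ⟨c0, _ | ⟨c1, _ | ⟨c2, _ | ⟨c3, _ | ⟨c4, _ | ⟨c5, _ | ⟨c6, _ | ⟨c7, _ | ⟨c8, _ | ⟨c9, _ | ⟨c10, _ | ⟨c11, _ | ⟨c12, _ | ⟨c13, _ | ⟨c14, _ | ⟨c15, rest⟩⟩⟩⟩⟩⟩⟩⟩⟩⟩⟩⟩⟩⟩⟩⟩ <;> try rfl
  -- remaining goal: length ≥ 16: every bounds check in A succeeds; truncate B's slice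
  have e2 : (((c0::c1::c2::c3::c4::c5::c6::c7::c8::c9::c10::c11::c12::c13::c14::c15::rest) : List Char).length : Int)
      = (rest.length : Int) + 16 := by push_cast [List.length_cons]; ring
  rw [show PySem.List.pyRange 0 4 1 = [0,1,2,3] from rfl]
  simp only [List.foldl_cons, List.foldl_nil, e2, Int.reduceAdd, Int.reduceMul,
    Int.reduceLT, pv_cond16, if_true, PySem.List.pyGetD_ofNat']
  have e3 : PySem.List.slice (c0::c1::c2::c3::c4::c5::c6::c7::c8::c9::c10::c11::c12::c13::c14::c15::rest) none (some 16)
      = [c0,c1,c2,c3,c4,c5,c6,c7,c8,c9,c10,c11,c12,c13,c14,c15] := by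
    rw [PySem.List.slice_to _ (by norm_num)]
    rfl
  rw [e3]
  rfl
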